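-- pv_equiv track=rewrite | github.com/Vermont-Complex-Systems/complex-stories | backend/shared/shared/clients/semantic_scholar.py | clean_doi
-- ===== SOURCE A (Python) =====
-- def clean_doi(doi: str) -> str:
--     """Clean DOI by removing common prefixes."""
--     prefixes_to_remove = [
--         "https://doi.org/",
--         "http://doi.org/",
--         "doi.org/",
--         "doi:",
--         "DOI:"
--     ]
--
--     cleaned_doi = doi.strip()
--     for prefix in prefixes_to_remove:
--         if cleaned_doi.lower().startswith(prefix.lower()):
--             cleaned_doi = cleaned_doi[len(prefix):]
--             break
--
--     return cleaned_doi
-- ===== SOURCE B (Python) =====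
-- def clean_doi(doi: str) -> str:
--     """Clean DOI by removing common prefixes (single substring search instead of a prefix loop)."""
--     s = doi.strip()
--     low = s.lower()
--     if low.startswith("doi:"):
--         return s[4:]
--     i = low.find("doi.org/")
--     if i == 0:
--         return s[8:]
--     if i == 7 and low.startswith("http://"):
--         return s[15:]
--     if i == 8 and low.startswith("https://"):
--         return s[16:]
--     return s
-- ===== Notes on version B (the rewrite author's own statement) =====
-- stated objective: alternative
-- what changed: Instead of looping over five candidate prefixes and testing a lowered startswith for each, B lowercases once, does one direct check for a doi colon prefix, and one substring search whose position (0, or 7/8 after an http(s) scheme) decides which prefix to strip.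
import Mathlib
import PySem

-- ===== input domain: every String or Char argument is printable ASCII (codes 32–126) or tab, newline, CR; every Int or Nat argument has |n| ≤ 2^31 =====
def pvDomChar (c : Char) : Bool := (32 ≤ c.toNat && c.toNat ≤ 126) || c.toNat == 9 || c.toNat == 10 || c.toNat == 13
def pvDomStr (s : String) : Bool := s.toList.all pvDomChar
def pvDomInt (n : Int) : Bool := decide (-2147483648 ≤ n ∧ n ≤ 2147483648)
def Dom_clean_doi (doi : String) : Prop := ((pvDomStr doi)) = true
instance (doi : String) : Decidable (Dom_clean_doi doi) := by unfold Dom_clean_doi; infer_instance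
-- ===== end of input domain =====

-- B replaces A's prefix loop by one case-insensitive substring search for "doi.org/" plus a
-- direct "doi:" check (objective: alternative — a different algorithm of similar cost).

-- ===== PORT A =====
-- the for-loop over prefixes_to_remove with break, as structural recursion on the prefix list
def cleanLoopA : List (List Char) → List Char → List Char
  | [], cleaned => cleaned
  | p :: ps, cleaned =>
    if PySem.Chars.startswith (PySem.Chars.lower cleaned) (PySem.Chars.lower p) then
      PySem.List.slice cleaned (some (p.length : Int)) none
    else cleanLoopA ps cleaned

def clean_doi (doi : String) : String :=
  String.ofList
    (cleanLoopA
      ["https://doi.org/".toList, "http://doi.org/".toList, "doi.org/".toList,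
       "doi:".toList, "DOI:".toList]
      (PySem.Chars.strip doi.toList))

-- ===== PORT B =====
def cleanCoreB (s : List Char) : List Char :=
  let low := PySem.Chars.lower s
  if PySem.Chars.startswith low "doi:".toList then
    PySem.List.slice s (some 4) none
  else
    let i := PySem.Chars.find low "doi.org/".toList
    if i = 0 then
      PySem.List.slice s (some 8) none
    else if i = 7 ∧ PySem.Chars.startswith low "http://".toList then
      PySem.List.slice s (some 15) none
    else if i = 8 ∧ PySem.Chars.startswith low "https://".toList then
      PySem.List.slice s (some 16) none
    else s

def clean_doi_alt (doi : String) : String :=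
  String.ofList (cleanCoreB (PySem.Chars.strip doi.toList))

-- ===== PRECONDITION & SPEC =====
def Spec_clean_doi (doi : String) (out : String) : Prop := out = clean_doi_alt doi
instance (doi : String) (out : String) : Decidable (Spec_clean_doi doi out) := by unfold Spec_clean_doi; infer_instance

-- ===== CLAIM (what is proved, stated in full; the proofs are below) =====
def Claim_equal_clean_doi : Prop := ∀ (doi : String), Dom_clean_doi doi → Spec_clean_doi doi (clean_doi doi)

-- ===== LEMMAS AND PROOFS =====

lemma prefGet {p l : List Char} (h : p <+: l) {j : Nat} (hj : j < p.length) :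
    l[j]? = some (p[j]'hj) := by
  obtain ⟨u, rfl⟩ := h
  rw [List.getElem?_append_left hj, List.getElem?_eq_getElem hj]

lemma prefNe {p q l : List Char} (hp : p <+: l) (hq : q <+: l) (j : Nat)
    (hjp : j < p.length) (hjq : j < q.length) (hne : p[j]'hjp ≠ q[j]'hjq) : False := by
  have h1 := prefGet hp hjp
  have h2 := prefGet hq hjq
  rw [h1] at h2
  exact hne (Option.some.inj h2)

lemma sw_false {l p : List Char} (h : ¬ p <+: l) : PySem.Chars.startswith l p = false := by
  cases hsp : PySem.Chars.startswith l p
  · rfl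
  · exact absurd ((PySem.Chars.startswith_iff _ _).mp hsp) h

lemma find_eq_of (s sub : List Char) (k : Nat) (hk : sub <+: s.drop k)
    (hmin : ∀ i < k, ¬ sub <+: s.drop i) : PySem.Chars.find s sub = (k : Int) := by
  have hinf : sub <:+: s := by
    obtain ⟨v, hv⟩ := hk
    exact ⟨s.take k, v, by rw [List.append_assoc, hv, List.take_append_drop]⟩
  have h0 : 0 ≤ PySem.Chars.find s sub := (PySem.Chars.find_nonneg_iff s sub).mpr hinf
  obtain ⟨hpre, hm⟩ := PySem.Chars.find_spec h0
  have : (PySem.Chars.find s sub).toNat = k := by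
    rcases Nat.lt_trichotomy (PySem.Chars.find s sub).toNat k with h | h | h
    · exact absurd hpre (hmin _ h)
    · exact h
    · exact absurd hk (hm k h)
  omega

lemma noOcc_http (u : List Char) (i : Nat) (hi : i < 7) :
    ¬ "doi.org/".toList <+: ("http://doi.org/".toList ++ u).drop i := by
  intro h
  have hlen : ("http://doi.org/".toList).length = 15 := by decide
  have h0 := prefGet h (j := 0) (by decide)
  rw [List.getElem?_drop] at h0
  rw [List.getElem?_append_left (by omega)] at h0
  interval_cases i <;> exact absurd h0 (by decide)

lemma noOcc_https (u : List Char) (i : Nat) (hi : i < 8) :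
    ¬ "doi.org/".toList <+: ("https://doi.org/".toList ++ u).drop i := by
  intro h
  have hlen : ("https://doi.org/".toList).length = 16 := by decide
  have h0 := prefGet h (j := 0) (by decide)
  rw [List.getElem?_drop] at h0
  rw [List.getElem?_append_left (by omega)] at h0
  interval_cases i <;> exact absurd h0 (by decide)

lemma find_https {low : List Char} (h : "https://doi.org/".toList <+: low) :
    PySem.Chars.find low "doi.org/".toList = 8 := by
  obtain ⟨u, rfl⟩ := h
  refine find_eq_of _ _ 8 ?_ ?_
  · rw [List.drop_append_of_le_length (by decide),
      show List.drop 8 "https://doi.org/".toList = "doi.org/".toList from by decide]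
    exact List.prefix_append _ _
  · exact fun i hi => noOcc_https u i hi

lemma find_http {low : List Char} (h : "http://doi.org/".toList <+: low) :
    PySem.Chars.find low "doi.org/".toList = 7 := by
  obtain ⟨u, rfl⟩ := h
  refine find_eq_of _ _ 7 ?_ ?_
  · rw [List.drop_append_of_le_length (by decide),
      show List.drop 7 "http://doi.org/".toList = "doi.org/".toList from by decide]
    exact List.prefix_append _ _
  · exact fun i hi => noOcc_http u i hi

lemma find_doiorg {low : List Char} (h : "doi.org/".toList <+: low) :
    PySem.Chars.find low "doi.org/".toList = 0 := by
  refine find_eq_of _ _ 0 (by simpa using h) ?_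
  intro i hi
  omega

lemma prefix_of_find0 {low : List Char} (h : PySem.Chars.find low "doi.org/".toList = 0) :
    "doi.org/".toList <+: low := by
  have h0 : 0 ≤ PySem.Chars.find low "doi.org/".toList := by rw [h]
  have := (PySem.Chars.find_spec h0).1
  rw [h] at this
  simpa using this

lemma prefix_of_find7 {low : List Char} (h : PySem.Chars.find low "doi.org/".toList = 7)
    (hh : "http://".toList <+: low) : "http://doi.org/".toList <+: low := by
  obtain ⟨u, rfl⟩ := hh
  have h0 : 0 ≤ PySem.Chars.find ("http://".toList ++ u) "doi.org/".toList := by rw [h]; decide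
  have hp := (PySem.Chars.find_spec h0).1
  rw [h] at hp
  rw [show ((7 : Int)).toNat = 7 from rfl,
    List.drop_append_of_le_length (by decide),
    show List.drop 7 "http://".toList = ([] : List Char) from by decide,
    List.nil_append] at hp
  obtain ⟨v, hv⟩ := hp
  exact ⟨v, by rw [show "http://doi.org/".toList = "http://".toList ++ "doi.org/".toList from by decide,
    List.append_assoc, hv]⟩

lemma prefix_of_find8 {low : List Char} (h : PySem.Chars.find low "doi.org/".toList = 8)
    (hh : "https://".toList <+: low) : "https://doi.org/".toList <+: low := by
  obtain ⟨u, rfl⟩ := hh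
  have h0 : 0 ≤ PySem.Chars.find ("https://".toList ++ u) "doi.org/".toList := by rw [h]; decide
  have hp := (PySem.Chars.find_spec h0).1
  rw [h] at hp
  rw [show ((8 : Int)).toNat = 8 from rfl,
    List.drop_append_of_le_length (by decide),
    show List.drop 8 "https://".toList = ([] : List Char) from by decide,
    List.nil_append] at hp
  obtain ⟨v, hv⟩ := hp
  exact ⟨v, by rw [show "https://doi.org/".toList = "https://".toList ++ "doi.org/".toList from by decide,
    List.append_assoc, hv]⟩

lemma coreAB (s : List Char) :
    cleanLoopA
      ["https://doi.org/".toList, "http://doi.org/".toList, "doi.org/".toList,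
       "doi:".toList, "DOI:".toList] s = cleanCoreB s := by
  have e16 : PySem.Chars.lower "https://doi.org/".toList = "https://doi.org/".toList := by decide
  have e15 : PySem.Chars.lower "http://doi.org/".toList = "http://doi.org/".toList := by decide
  have e8 : PySem.Chars.lower "doi.org/".toList = "doi.org/".toList := by decide
  have e4 : PySem.Chars.lower "doi:".toList = "doi:".toList := by decide
  have eU : PySem.Chars.lower "DOI:".toList = "doi:".toList := by decide
  simp only [cleanLoopA, cleanCoreB, e16, e15, e8, e4, eU]
  generalize PySem.Chars.lower s = low
  by_cases hd : "doi:".toList <+: low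
  · have nh16 : ¬ "https://doi.org/".toList <+: low :=
      fun h => prefNe hd h 0 (by decide) (by decide) (by decide)
    have nh15 : ¬ "http://doi.org/".toList <+: low :=
      fun h => prefNe hd h 0 (by decide) (by decide) (by decide)
    have nh8 : ¬ "doi.org/".toList <+: low :=
      fun h => prefNe hd h 3 (by decide) (by decide) (by decide)
    have b4 : PySem.Chars.startswith low "doi:".toList = true :=
      (PySem.Chars.startswith_iff _ _).mpr hd
    have b16 := sw_false nh16
    have b15 := sw_false nh15
    have b8 := sw_false nh8
    simp_all
  · have bd := sw_false hd
    by_cases h1 : "https://doi.org/".toList <+: low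
    · have hf := find_https h1
      have b16 : PySem.Chars.startswith low "https://doi.org/".toList = true :=
        (PySem.Chars.startswith_iff _ _).mpr h1
      have bhs : PySem.Chars.startswith low "https://".toList = true :=
        (PySem.Chars.startswith_iff _ _).mpr
          ((show "https://".toList <+: "https://doi.org/".toList from by decide).trans h1)
      simp_all
    · have b16 := sw_false h1
      by_cases h2 : "http://doi.org/".toList <+: low
      · have hf := find_http h2
        have b15 : PySem.Chars.startswith low "http://doi.org/".toList = true :=
          (PySem.Chars.startswith_iff _ _).mpr h2
        have bht : PySem.Chars.startswith low "http://".toList = true :=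
          (PySem.Chars.startswith_iff _ _).mpr
            ((show "http://".toList <+: "http://doi.org/".toList from by decide).trans h2)
        simp_all
      · have b15 := sw_false h2
        by_cases h3 : "doi.org/".toList <+: low
        · have hf := find_doiorg h3
          have b8 : PySem.Chars.startswith low "doi.org/".toList = true :=
            (PySem.Chars.startswith_iff _ _).mpr h3
          simp_all
        · have b8 := sw_false h3
          simp only [b16, b15, b8, bd, Bool.false_eq_true, if_false]
          split_ifs with ha hb hc
          · exact absurd (prefix_of_find0 ha) h3
          · exact absurd (prefix_of_find7 hb.1 ((PySem.Chars.startswith_iff _ _).mp hb.2)) h2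
          · exact absurd (prefix_of_find8 hc.1 ((PySem.Chars.startswith_iff _ _).mp hc.2)) h1
          · rfl

-- ===== VERDICT (by name: the statement is the Claim_ definition above) =====
theorem clean_doi_spec : Claim_equal_clean_doi := by
  intro doi _
  unfold Spec_clean_doi clean_doi clean_doi_alt
  rw [coreAB]
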